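-- pv_equiv track=rewrite | github.com/Rayyan9477/OCR-Image-to-text | precision_layout_ocr.py | _find_common_values
-- ===== SOURCE A (Python) =====
-- from typing import List, Dict, Any, Tuple, Optional, Union
-- from collections import defaultdict
--
-- def _find_common_values(values: List[int], tolerance: int = 10) -> List[int]:
--     """Find commonly occurring values within tolerance"""
--     if not values:
--         return []
--
--     groups = defaultdict(list)
--     for value in values:
--         # Find the group this value belongs to
--         group_key = None
--         for key in groups:
--             if abs(value - key) <= tolerance:
--                 group_key = key
--                 break
--
--         if group_key is None:
--             group_key = value
--
--         groups[group_key].append(value)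
--
--     # Return groups with more than one occurrence
--     common = []
--     for key, group in groups.items():
--         if len(group) >= 2:
--             avg_value = sum(group) // len(group)
--             common.append(avg_value)
--
--     return sorted(common)
-- ===== SOURCE B (Python) =====
-- from typing import List
--
-- def _bisect_left(a, x):
--     lo, hi = 0, len(a)
--     while lo < hi:
--         mid = (lo + hi) // 2
--         if a[mid] < x:
--             lo = mid + 1
--         else:
--             hi = mid
--     return lo
--
-- def _bisect_right(a, x):
--     lo, hi = 0, len(a)
--     while lo < hi:
--         mid = (lo + hi) // 2
--         if x < a[mid]:
--             hi = mid
--         else: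
--             lo = mid + 1
--     return lo
--
-- def _find_common_values(values: List[int], tolerance: int = 10) -> List[int]:
--     """Find commonly occurring values within tolerance (sorted-keys reimplementation).
--
--     Group keys are kept in a sorted list: the candidate keys for a value are the
--     ones inside the binary-searched tolerance window; among those candidates the
--     earliest-created group wins, which is exactly the first-match rule of the
--     greedy scan.  Per group only a running (creation-order, count, sum) triple
--     is kept instead of the member list.
--     """
--     keys = []   # group keys, sorted ascending
--     info = {}   # key -> (creation order, count, sum)
--     for v in values:
--         lo = _bisect_left(keys, v - tolerance)
--         hi = _bisect_right(keys, v + tolerance)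
--         window = keys[lo:hi]          # exactly the keys within tolerance of v
--         if window:
--             gk = min(window, key=lambda k: info[k][0])   # earliest-created group
--         else:
--             gk = v
--         if gk in info:
--             o, c, s = info[gk]
--             info[gk] = (o, c + 1, s + v)
--         else:
--             keys.insert(_bisect_left(keys, gk), gk)
--             info[gk] = (len(info), 1, v)
--     return sorted(s // c for (_, c, s) in info.values() if c >= 2)
-- ===== Notes on version B (the rewrite author's own statement) =====
-- stated objective: alternative
-- what changed: A scans every existing group key for each value (first key within tolerance wins); B keeps the group keys in a sorted list, locates the candidate keys by binary search on the tolerance window, picks the earliest-created candidate via a stored creation index, and keeps only a (creation order, count, sum) triple per group instead of the member lists.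
import Mathlib
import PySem

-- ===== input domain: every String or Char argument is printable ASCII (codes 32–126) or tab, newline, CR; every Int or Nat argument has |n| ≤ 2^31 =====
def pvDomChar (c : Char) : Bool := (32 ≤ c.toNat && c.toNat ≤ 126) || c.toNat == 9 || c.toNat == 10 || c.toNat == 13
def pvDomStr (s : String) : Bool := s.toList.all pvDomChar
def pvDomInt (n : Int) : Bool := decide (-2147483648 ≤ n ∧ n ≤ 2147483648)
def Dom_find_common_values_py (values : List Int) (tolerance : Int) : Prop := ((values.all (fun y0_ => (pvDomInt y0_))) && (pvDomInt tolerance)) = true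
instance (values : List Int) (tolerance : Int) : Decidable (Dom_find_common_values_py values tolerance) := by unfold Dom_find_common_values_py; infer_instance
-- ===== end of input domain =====

-- B replaces A's linear scan over all group keys by a sorted key list searched with
-- binary-search windows, keeping only (creation order, count, sum) per group.

-- ===== PORT A =====
-- one step of A's grouping loop: find the first existing group key within tolerance
-- (dict iteration order = insertion order), else open a group keyed by the value itself
def stepA (tolerance : Int) (g : PySem.Dict Int (List Int)) (v : Int) : PySem.Dict Int (List Int) :=
  let gk : Int :=
    match g.keys.find? (fun k => decide (|v - k| ≤ tolerance)) with
    | some k => k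
    | none => v
  g.modify gk [] (· ++ [v])    -- groups[group_key].append(value) on the defaultdict

def find_common_values_py (values : List Int) (tolerance : Int) : List Int :=
  if values = [] then []
  else
    let groups := values.foldl (stepA tolerance) PySem.Dict.empty
    let common := groups.items.foldl
      (fun acc kg =>
        if 2 ≤ PySem.List.len kg.2 then
          acc ++ [PySem.Int.floordiv kg.2.sum (PySem.List.len kg.2)]
        else acc) []
    PySem.List.sorted common (fun x => x) false

-- ===== PORT B =====
-- one step of B's loop; state = (sorted key list, key ↦ (creation order, count, sum))
def stepB (tolerance : Int) (st : List Int × PySem.Dict Int (Int × Int × Int)) (v : Int) :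
    List Int × PySem.Dict Int (Int × Int × Int) :=
  let keys := st.1
  let info := st.2
  let lo := PySem.List.bisectLeft keys (v - tolerance)    -- hand-written _bisect_left in Source B
  let hi := PySem.List.bisectRight keys (v + tolerance)   -- hand-written _bisect_right in Source B
  let window := PySem.List.slice keys (some (lo : Int)) (some (hi : Int))
  let gk : Int :=
    match PySem.List.min? window (fun k => (info.getD k (0, 0, 0)).1) with
    | some k => k     -- min(window, key=lambda k: info[k][0]); keys in window are in info
    | none => v
  match info.get? gk with
  | some ocs => (keys, info.insert gk (ocs.1, ocs.2.1 + 1, ocs.2.2 + v))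
  | none =>
      (PySem.List.insert keys ((PySem.List.bisectLeft keys gk : Nat) : Int) gk,
       info.insert gk ((info.size : Int), 1, v))

def find_common_values_py_alt (values : List Int) (tolerance : Int) : List Int :=
  let st := values.foldl (stepB tolerance) ([], PySem.Dict.empty)
  PySem.List.sorted
    ((st.2.values.filter (fun t => 2 ≤ t.2.1)).map (fun t => PySem.Int.floordiv t.2.2 t.2.1))
    (fun x => x) false

-- ===== PRECONDITION & SPEC =====
def Spec_find_common_values_py (values : List Int) (tolerance : Int) (out : List Int) : Prop := out = find_common_values_py_alt values tolerance
instance (values : List Int) (tolerance : Int) (out : List Int) : Decidable (Spec_find_common_values_py values tolerance out) := by unfold Spec_find_common_values_py; infer_instance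

-- ===== CLAIM (what is proved, stated in full; the proofs are below) =====
def Claim_equal_find_common_values_py : Prop := ∀ (values : List Int) (tolerance : Int), Dom_find_common_values_py values tolerance → Spec_find_common_values_py values tolerance (find_common_values_py values tolerance)

-- ===== LEMMAS AND PROOFS =====

-- B's info dict, expressed from A's groups dict: entry i of A becomes (key, (i, count, sum))
def tagItems : List (Int × List Int) → Nat → List (Int × (Int × Int × Int))
  | [], _ => []
  | kg :: rest, n => (kg.1, ((n : Int), (kg.2.length : Int), kg.2.sum)) :: tagItems rest (n + 1)

-- the coupling invariant between A's state and B's state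
def StInv (g : PySem.Dict Int (List Int)) (keys : List Int)
    (info : PySem.Dict Int (Int × Int × Int)) : Prop :=
  g.keys.Nodup ∧ info.items = tagItems g.items 0 ∧
    keys.Perm g.keys ∧ keys.Pairwise (· ≤ ·)

theorem tagItems_length (l : List (Int × List Int)) (n : Nat) :
    (tagItems l n).length = l.length := by
  induction l generalizing n with
  | nil => rfl
  | cons kg rest ih => simp [tagItems, ih]

theorem tagItems_keys (l : List (Int × List Int)) (n : Nat) :
    (tagItems l n).map (·.1) = l.map (·.1) := by
  induction l generalizing n with
  | nil => rfl
  | cons kg rest ih => simp [tagItems, ih]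

theorem tagItems_append (l₁ l₂ : List (Int × List Int)) (n : Nat) :
    tagItems (l₁ ++ l₂) n = tagItems l₁ n ++ tagItems l₂ (n + l₁.length) := by
  induction l₁ generalizing n with
  | nil => simp [tagItems]
  | cons kg rest ih => simp [tagItems, ih, Nat.add_assoc, Nat.add_comm 1]

theorem tagItems_getElem (l : List (Int × List Int)) (n : Nat) (i : Nat) (hi : i < l.length) :
    (tagItems l n)[i]'(by rw [tagItems_length]; exact hi)
      = (l[i].1, (((n + i : Nat) : Int), (l[i].2.length : Int), l[i].2.sum)) := by
  induction l generalizing n i with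
  | nil => simp at hi
  | cons kg rest ih =>
    cases i with
    | zero => simp [tagItems]
    | succ j =>
      simp only [tagItems, List.getElem_cons_succ]
      rw [ih (n+1) j (by simpa using hi)]
      congr 2
      omega

theorem abs_window (v k t : Int) : (|v - k| ≤ t) ↔ (v - t ≤ k ∧ k ≤ v + t) := by
  rw [abs_le]; omega

theorem window_eq (keys : List Int) (hs : keys.Pairwise (· ≤ ·)) (v t : Int) :
    PySem.List.slice keys (some ((PySem.List.bisectLeft keys (v - t) : Nat) : Int))
        (some ((PySem.List.bisectRight keys (v + t) : Nat) : Int))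
      = keys.filter (fun k => decide (|v - k| ≤ t)) := by
  obtain ⟨hL0, hL1, hL2⟩ := PySem.List.bisectLeft_spec keys (v - t) hs
  obtain ⟨hR0, hR1, hR2⟩ := PySem.List.bisectRight_spec keys (v + t) hs
  set lo := PySem.List.bisectLeft keys (v - t) with hlo
  set hi := PySem.List.bisectRight keys (v + t) with hhi
  rw [PySem.List.slice_natCast]
  by_cases hcase : hi ≤ lo
  · rw [Nat.sub_eq_zero_of_le hcase, List.take_zero]
    symm
    rw [List.filter_eq_nil_iff]
    intro k hk hp
    obtain ⟨j, hj, rfl⟩ := List.mem_iff_getElem.mp hk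
    rw [decide_eq_true_eq, abs_window] at hp
    rcases Nat.lt_or_ge j lo with h | h
    · exact absurd hp.1 (not_le.mpr (hL1 j hj h))
    · exact absurd hp.2 (not_le.mpr (hR2 j hj (le_trans hcase h)))
  · rw [Nat.not_le] at hcase
    have hmid : (keys.drop lo).take (hi - lo) ++ keys.drop hi = keys.drop lo := by
      have h1 := List.take_append_drop (hi - lo) (keys.drop lo)
      rwa [List.drop_drop, show lo + (hi - lo) = hi by omega] at h1
    have hdecomp : keys = keys.take lo ++ ((keys.drop lo).take (hi - lo) ++ keys.drop hi) := by
      rw [hmid, List.take_append_drop]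
    conv_rhs => rw [hdecomp]
    rw [List.filter_append, List.filter_append]
    have h1 : (keys.take lo).filter (fun k => decide (|v - k| ≤ t)) = [] := by
      rw [List.filter_eq_nil_iff]
      intro k hk hp
      obtain ⟨j, hj, rfl⟩ := List.mem_iff_getElem.mp hk
      rw [List.getElem_take] at hp
      rw [decide_eq_true_eq, abs_window] at hp
      have hjlo : j < lo := by
        have := hj; simp [List.length_take] at this; omega
      exact absurd hp.1 (not_le.mpr (hL1 j (by omega) hjlo))
    have h2 : ((keys.drop lo).take (hi - lo)).filter (fun k => decide (|v - k| ≤ t))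
        = (keys.drop lo).take (hi - lo) := by
      rw [List.filter_eq_self]
      intro k hk
      obtain ⟨j, hj, rfl⟩ := List.mem_iff_getElem.mp hk
      rw [List.getElem_take, List.getElem_drop]
      rw [decide_eq_true_eq, abs_window]
      have hjlen : lo + j < keys.length := by
        have := hj
        simp [List.length_take, List.length_drop] at this
        omega
      have hjhi : lo + j < hi := by
        have := hj; simp [List.length_take, List.length_drop] at this; omega
      exact ⟨hL2 (lo + j) hjlen (by omega), hR1 (lo + j) hjlen hjhi⟩
    have h3 : (keys.drop hi).filter (fun k => decide (|v - k| ≤ t)) = [] := by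
      rw [List.filter_eq_nil_iff]
      intro k hk hp
      obtain ⟨j, hj, rfl⟩ := List.mem_iff_getElem.mp hk
      rw [List.getElem_drop] at hp
      rw [decide_eq_true_eq, abs_window] at hp
      have hjlen : hi + j < keys.length := by
        have := hj; simp [List.length_drop] at this; omega
      exact absurd hp.2 (not_le.mpr (hR2 (hi + j) hjlen (by omega)))
    rw [h1, h2, h3]
    simp

theorem pyInsert_natCast (xs : List Int) (n : Nat) (h : n ≤ xs.length) (v : Int) :
    PySem.List.insert xs (n:Int) v = xs.take n ++ v :: xs.drop n := by
  simp only [PySem.List.insert, PySem.List.sliceIndices]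
  have h1 : ¬ ((n:Int) < 0) := by omega
  have h2 : min (n:Int) (xs.length:Int) = (n:Int) := by omega
  simp [h1, h2]

theorem ord_spec (g : PySem.Dict Int (List Int)) (info : PySem.Dict Int (Int × Int × Int))
    (hnd : g.keys.Nodup) (hit : info.items = tagItems g.items 0)
    (i : Nat) (hi : i < g.items.length) :
    info.get? g.items[i].1 = some ((i : Int), (g.items[i].2.length : Int), g.items[i].2.sum) := by
  have hknd : info.keys.Nodup := by
    have : info.keys = g.keys := by
      simp only [PySem.Dict.keys, hit, tagItems_keys]
    rwa [this]
  apply PySem.Dict.get?_of_mem_items _ _ hknd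
  have hmem : (tagItems g.items 0)[i]'(by rw [tagItems_length]; exact hi) ∈ info.items := by
    rw [hit]; exact List.getElem_mem _
  rw [tagItems_getElem g.items 0 i hi] at hmem
  simpa using hmem

theorem gk_eq (g : PySem.Dict Int (List Int)) (keys : List Int)
    (info : PySem.Dict Int (Int × Int × Int)) (hinv : StInv g keys info) (v t : Int) :
    (match PySem.List.min? (keys.filter (fun k => decide (|v - k| ≤ t)))
        (fun k => (info.getD k (0, 0, 0)).1) with
     | some k => k
     | none => v)
      = (match g.keys.find? (fun k => decide (|v - k| ≤ t)) with
         | some k => k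
         | none => v) := by
  obtain ⟨hnd, hit, hperm, hsort⟩ := hinv
  have hpf : (keys.filter (fun k => decide (|v - k| ≤ t))).Perm
      (g.keys.filter (fun k => decide (|v - k| ≤ t))) := hperm.filter _
  cases hfind : g.keys.find? (fun k => decide (|v - k| ≤ t)) with
  | none =>
    have hnil : g.keys.filter (fun k => decide (|v - k| ≤ t)) = [] := by
      rw [List.filter_eq_nil_iff]
      intro k hk
      exact fun hp => (List.find?_eq_none.mp hfind k hk) hp
    have : keys.filter (fun k => decide (|v - k| ≤ t)) = [] := by
      have := hpf; rw [hnil] at this; exact this.eq_nil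
    rw [this]
    simp [PySem.List.min?]
  | some k0 =>
    obtain ⟨hp0, i0, hi0, hk0, hfirst⟩ := List.find?_eq_some_iff_getElem.mp hfind
    have hi0' : i0 < g.items.length := by simpa [PySem.Dict.keys] using hi0
    -- the window is nonempty: k0 belongs to it
    have hk0mem : k0 ∈ keys.filter (fun k => decide (|v - k| ≤ t)) := by
      rw [hpf.mem_iff, List.mem_filter]
      exact ⟨hk0 ▸ List.getElem_mem hi0, hp0⟩
    cases hmin : PySem.List.min? (keys.filter (fun k => decide (|v - k| ≤ t)))
        (fun k => (info.getD k (0, 0, 0)).1) with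
    | none =>
      rw [PySem.List.min?_eq_none_iff] at hmin
      rw [hmin] at hk0mem; simp at hk0mem
    | some m =>
      have hmmem := PySem.List.min?_mem hmin
      have hmin_le := PySem.List.min?_isMin hmin
      -- m is in g.keys and satisfies the predicate
      have hmkeys : m ∈ g.keys ∧ decide (|v - m| ≤ t) = true := by
        have := hpf.mem_iff.mp hmmem
        rw [List.mem_filter] at this
        exact this
      obtain ⟨im, him, hm⟩ := List.mem_iff_getElem.mp hmkeys.1
      have him' : im < g.items.length := by simpa [PySem.Dict.keys] using him
      -- ord values via ord_spec
      have hordm : (info.getD m (0,0,0)).1 = (im : Int) := by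
        have := ord_spec g info hnd hit im him'
        have hm' : g.items[im].1 = m := by
          have : g.keys[im]'him = g.items[im].1 := by simp [PySem.Dict.keys]
          rw [← this, hm]
        rw [hm'] at this
        simp [PySem.Dict.getD, this]
      have hordk0 : (info.getD k0 (0,0,0)).1 = (i0 : Int) := by
        have := ord_spec g info hnd hit i0 hi0'
        have hk0' : g.items[i0].1 = k0 := by
          have : g.keys[i0]'hi0 = g.items[i0].1 := by simp [PySem.Dict.keys]
          rw [← this, hk0]
        rw [hk0'] at this
        simp [PySem.Dict.getD, this]
      -- i0 ≤ im since i0 is the first match; im ≤ i0 by minimality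
      have h1 : (im : Int) ≤ (i0 : Int) := by
        have := hmin_le k0 hk0mem
        rwa [hordm, hordk0] at this
      have h2 : i0 ≤ im := by
        by_contra hlt
        have : ¬ (decide (|v - g.keys[im]'him| ≤ t)) = true := by
          have := hfirst im (by omega)
          simpa using this
        rw [hm] at this
        exact this hmkeys.2
      have : im = i0 := by omega
      subst this
      rw [← hm, hk0]

theorem out_eq (l : List (Int × List Int)) (n : Nat) :
    (((tagItems l n).map (·.2)).filter (fun t => 2 ≤ t.2.1)).map
        (fun t => PySem.Int.floordiv t.2.2 t.2.1)
      = (l.filter (fun kg => decide (2 ≤ PySem.List.len kg.2))).map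
          (fun kg => PySem.Int.floordiv kg.2.sum (PySem.List.len kg.2)) := by
  induction l generalizing n with
  | nil => rfl
  | cons kg rest ih =>
    simp only [tagItems, List.map_cons, List.filter_cons, PySem.List.len_eq]
    by_cases h : 2 ≤ (kg.2.length : Int)
    · simp [h, ih]
    · simp [h, ih]

theorem step_inv (g : PySem.Dict Int (List Int)) (keys : List Int)
    (info : PySem.Dict Int (Int × Int × Int)) (hinv : StInv g keys info) (t v : Int) :
    StInv (stepA t g v) (stepB t (keys, info) v).1 (stepB t (keys, info) v).2 := by
  obtain ⟨hnd, hit, hperm, hsort⟩ := hinv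
  have hknd : info.keys.Nodup := by
    have : info.keys = g.keys := by simp only [PySem.Dict.keys, hit, tagItems_keys]
    rwa [this]
  have hikeys : info.keys = g.keys := by simp only [PySem.Dict.keys, hit, tagItems_keys]
  simp only [stepA, stepB]
  rw [window_eq keys hsort v t, gk_eq g keys info ⟨hnd, hit, hperm, hsort⟩ v t]
  set k := (match g.keys.find? (fun k => decide (|v - k| ≤ t)) with
            | some k => k
            | none => v) with hkdef
  by_cases hk : k ∈ g.keys
  · -- existing group: both sides update the entry of key k in place
    have hk' : k ∈ g.items.map (·.1) := by simpa [PySem.Dict.keys] using hk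
    obtain ⟨pr, hpr, hfst⟩ := List.mem_map.mp hk'
    obtain ⟨l1, l2, hsplit⟩ := List.append_of_mem hpr
    have hkeysplit : g.keys = l1.map (·.1) ++ k :: l2.map (·.1) := by
      show g.items.map (·.1) = _
      rw [hsplit]; simp [hfst]
    have hnotl1 : k ∉ l1.map (·.1) := by
      rw [hkeysplit] at hnd
      intro hmem
      exact List.disjoint_of_nodup_append hnd hmem List.mem_cons_self
    have hnotl2 : k ∉ l2.map (·.1) := by
      rw [hkeysplit] at hnd
      exact (List.nodup_cons.mp (List.nodup_append.mp hnd).2.1).1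
    -- A's lookup and update
    have hgetA : g.get? k = some pr.2 := by
      apply PySem.Dict.get?_of_mem_items _ (hfst ▸ hpr) hnd
    have hcontA : g.contains k = true := (PySem.Dict.contains_iff_mem_keys _ _).mpr hk
    have hitemsA : (PySem.Dict.modify g k [] (· ++ [v])).items
        = l1 ++ (k, pr.2 ++ [v]) :: l2 := by
      show (g.insert k (g.getD k [] ++ [v])).items = _
      rw [PySem.Dict.items_insert_of_contains _ _ hcontA, hsplit]
      have hgd : g.getD k [] = pr.2 := by simp [PySem.Dict.getD, hgetA]
      rw [hgd]
      rw [List.map_append, List.map_cons]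
      congr 1
      · refine (List.map_congr_left ?_).trans (List.map_id' l1)
        intro p hp
        have : p.1 ≠ k := fun h => hnotl1 (h ▸ List.mem_map_of_mem hp)
        simp [this]
      · congr 1
        · simp [hfst]
        · refine (List.map_congr_left ?_).trans (List.map_id' l2)
          intro p hp
          have : p.1 ≠ k := fun h => hnotl2 (h ▸ List.mem_map_of_mem hp)
          simp [this]
    -- B's lookup and update
    have hitsplit : info.items = tagItems l1 0
        ++ (k, ((l1.length : Int), (pr.2.length : Int), pr.2.sum))
          :: tagItems l2 (l1.length + 1) := by
      rw [hit, hsplit, tagItems_append]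
      simp [tagItems, hfst]
    have hgetB : info.get? k = some ((l1.length : Int), (pr.2.length : Int), pr.2.sum) := by
      apply PySem.Dict.get?_of_mem_items _ _ hknd
      rw [hitsplit]; simp
    rw [hgetB]
    have hcontB : info.contains k = true := by
      rw [PySem.Dict.contains_iff_mem_keys, hikeys]; exact hk
    have hitemsB : (info.insert k ((l1.length : Int), (pr.2.length : Int) + 1, pr.2.sum + v)).items
        = tagItems l1 0
            ++ (k, ((l1.length : Int), (pr.2.length : Int) + 1, pr.2.sum + v))
              :: tagItems l2 (l1.length + 1) := by
      rw [PySem.Dict.items_insert_of_contains _ _ hcontB, hitsplit]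
      rw [List.map_append, List.map_cons]
      congr 1
      · refine (List.map_congr_left ?_).trans (List.map_id' _)
        intro p hp
        have hpk : p.1 ≠ k := by
          intro h
          apply hnotl1
          have : p.1 ∈ (tagItems l1 0).map (·.1) := List.mem_map_of_mem hp
          rwa [tagItems_keys, h] at this
        simp [hpk]
      · congr 1
        · simp
        · refine (List.map_congr_left ?_).trans (List.map_id' _)
          intro p hp
          have hpk : p.1 ≠ k := by
            intro h
            apply hnotl2
            have : p.1 ∈ (tagItems l2 (l1.length + 1)).map (·.1) := List.mem_map_of_mem hp
            rwa [tagItems_keys, h] at this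
          simp [hpk]
    have hkeysA : (PySem.Dict.modify g k [] (· ++ [v])).keys = g.keys := by
      show (PySem.Dict.modify g k [] (· ++ [v])).items.map (·.1) = _
      rw [hitemsA, hkeysplit]
      simp
    refine ⟨by rw [hkeysA]; exact hnd, ?_, by rw [hkeysA]; exact hperm, hsort⟩
    show (info.insert k ((l1.length : Int), (pr.2.length : Int) + 1, pr.2.sum + v)).items = _
    rw [hitemsB, hitemsA, tagItems_append]
    congr 1
    simp only [tagItems, Nat.zero_add]
    push_cast [List.length_append, List.sum_append]
    simp
  · -- new group keyed by v itself: both sides append a fresh entry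
    have hkv : k = v := by
      rw [hkdef]
      cases hfind : g.keys.find? (fun k => decide (|v - k| ≤ t)) with
      | none => rfl
      | some k0 =>
        exfalso; apply hk
        rw [hkdef, hfind]
        exact List.mem_of_find?_eq_some hfind
    have hcontA : g.contains k = false := by
      rw [← Bool.not_eq_true, PySem.Dict.contains_iff_mem_keys]; exact hk
    have hgetB : info.get? k = none := by
      rw [PySem.Dict.get?_eq_none_iff_not_mem_keys, hikeys]; exact hk
    rw [hgetB]
    have hitemsA : (PySem.Dict.modify g k [] (· ++ [v])).items = g.items ++ [(k, [] ++ [v])] := by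
      show (g.insert k (g.getD k [] ++ [v])).items = _
      rw [PySem.Dict.getD_of_not_contains _ _ hcontA,
        PySem.Dict.items_insert_of_not_contains _ _ hcontA]
    have hcontB : info.contains k = false := by
      rw [← Bool.not_eq_true, PySem.Dict.contains_iff_mem_keys, hikeys]; exact hk
    have hitemsB : (info.insert k ((info.size : Int), 1, v)).items
        = info.items ++ [(k, ((info.size : Int), 1, v))] :=
      PySem.Dict.items_insert_of_not_contains _ _ hcontB
    have hkeysA : (PySem.Dict.modify g k [] (· ++ [v])).keys = g.keys ++ [k] := by
      show (PySem.Dict.modify g k [] (· ++ [v])).items.map (·.1) = _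
      rw [hitemsA]
      simp only [List.map_append, List.map_cons, List.map_nil, PySem.Dict.keys]
    obtain ⟨hL0, hL1, hL2⟩ := PySem.List.bisectLeft_spec keys k hsort
    set lo := PySem.List.bisectLeft keys k with hlo
    change StInv (PySem.Dict.modify g k [] (· ++ [v]))
      (PySem.List.insert keys ((lo : Nat) : Int) k) (info.insert k ((info.size : Int), 1, v))
    have hins : PySem.List.insert keys ((lo : Nat) : Int) k = keys.take lo ++ k :: keys.drop lo :=
      pyInsert_natCast keys lo hL0 k
    refine ⟨?_, ?_, ?_, ?_⟩
    · rw [hkeysA]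
      rw [List.nodup_append]
      refine ⟨hnd, List.nodup_singleton k, ?_⟩
      intro a ha b hb h
      exact hk ((h.trans (List.mem_singleton.mp hb)) ▸ ha)
    · show (info.insert k ((info.size : Int), 1, v)).items
          = tagItems (PySem.Dict.modify g k [] (· ++ [v])).items 0
      rw [hitemsB, hitemsA, tagItems_append, hit]
      have hsize : info.size = g.items.length := by
        show info.items.length = _
        rw [hit, tagItems_length]
      congr 1
      simp [tagItems, hsize]
    · rw [hkeysA, hins]
      refine List.Perm.trans ?_ ((hperm.cons k).trans (List.perm_append_singleton k g.keys).symm)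
      have hmid := @List.perm_middle _ k (keys.take lo) (keys.drop lo)
      rwa [List.take_append_drop] at hmid
    · rw [hins, List.pairwise_append]
      refine ⟨hsort.sublist (List.take_sublist lo keys), ?_, ?_⟩
      · rw [List.pairwise_cons]
        refine ⟨?_, hsort.sublist (List.drop_sublist lo keys)⟩
        intro b hb
        obtain ⟨j, hj, rfl⟩ := List.mem_iff_getElem.mp hb
        rw [List.getElem_drop]
        have hjlen : lo + j < keys.length := by
          have := hj; simp [List.length_drop] at this; omega
        exact hL2 (lo + j) hjlen (by omega)
      · intro a ha b hb
        obtain ⟨j, hj, rfl⟩ := List.mem_iff_getElem.mp ha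
        rw [List.getElem_take]
        have hjlo : j < lo := by
          have := hj; simp [List.length_take] at this; omega
        have hjlen : j < keys.length := by
          have := hj; simp [List.length_take] at this; omega
        have hak : keys[j] < k := hL1 j hjlen hjlo
        rcases List.mem_cons.mp hb with rfl | hb2
        · exact le_of_lt hak
        · obtain ⟨j2, hj2, rfl⟩ := List.mem_iff_getElem.mp hb2
          rw [List.getElem_drop]
          have hj2len : lo + j2 < keys.length := by
            have := hj2; simp [List.length_drop] at this; omega
          exact le_trans (le_of_lt hak) (hL2 (lo + j2) hj2len (by omega))

theorem fold_inv (t : Int) (vs : List Int) (g : PySem.Dict Int (List Int))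
    (keys : List Int) (info : PySem.Dict Int (Int × Int × Int)) (hinv : StInv g keys info) :
    StInv (vs.foldl (stepA t) g) (vs.foldl (stepB t) (keys, info)).1
      (vs.foldl (stepB t) (keys, info)).2 := by
  induction vs generalizing g keys info with
  | nil => exact hinv
  | cons v rest ih =>
    simp only [List.foldl_cons]
    have h := step_inv g keys info hinv t v
    have : stepB t (keys, info) v = ((stepB t (keys, info) v).1, (stepB t (keys, info) v).2) := rfl
    rw [this]
    exact ih _ _ _ h

-- ===== VERDICT (by name: the statement is the Claim_ definition above) =====
theorem find_common_values_py_spec : Claim_equal_find_common_values_py := by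
  intro values tolerance _
  unfold Spec_find_common_values_py find_common_values_py find_common_values_py_alt
  by_cases hv : values = []
  · subst hv; rfl
  · rw [if_neg hv]
    have hinv0 : StInv PySem.Dict.empty [] PySem.Dict.empty :=
      ⟨by simp [PySem.Dict.keys, PySem.Dict.empty], rfl, List.Perm.refl _, List.Pairwise.nil⟩
    obtain ⟨hnd, hit, hperm, hsort⟩ :=
      fold_inv tolerance values PySem.Dict.empty [] PySem.Dict.empty hinv0
    refine congrArg (fun l => PySem.List.sorted l (fun x => x) false) ?_
    rw [PySem.List.foldl_append_ite]
    have hvals : (values.foldl (stepB tolerance) ([], PySem.Dict.empty)).2.values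
        = (tagItems (values.foldl (stepA tolerance) PySem.Dict.empty).items 0).map (·.2) := by
      show (values.foldl (stepB tolerance) ([], PySem.Dict.empty)).2.items.map (·.2) = _
      rw [hit]
    rw [hvals, out_eq]
    simp
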